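-- pv_equiv track=rewrite | github.com/msrbss111/Password-Manager | password_manager_tool.py | check_master_key_policy
-- ===== SOURCE A (Python) =====
-- import string
--
-- def check_master_key_policy(MASTER_KEY):
--     if len(MASTER_KEY) < 14:
--         return False
--     if not any(capital.isupper() for capital in MASTER_KEY):
--         return False
--     if not any(digit.isdigit() for digit in MASTER_KEY):
--         return False
--     if not any(special_c in string.punctuation for special_c in MASTER_KEY):
--         return False
--     else:
--         return True
-- ===== SOURCE B (Python) =====
-- import string
--
-- def check_master_key_policy(MASTER_KEY):
--     has_upper = has_digit = has_special = False
--     for c in MASTER_KEY: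
--         if c.isupper():
--             has_upper = True
--         if c.isdigit():
--             has_digit = True
--         if c in string.punctuation:
--             has_special = True
--     return len(MASTER_KEY) >= 14 and has_upper and has_digit and has_special
-- ===== Notes on version B (the rewrite author's own statement) =====
-- stated objective: alternative
-- what changed: Replaces A's early-return chain of three separate any() scans with a single explicit pass over the string maintaining three boolean flags, combined at the end.
import Mathlib
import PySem

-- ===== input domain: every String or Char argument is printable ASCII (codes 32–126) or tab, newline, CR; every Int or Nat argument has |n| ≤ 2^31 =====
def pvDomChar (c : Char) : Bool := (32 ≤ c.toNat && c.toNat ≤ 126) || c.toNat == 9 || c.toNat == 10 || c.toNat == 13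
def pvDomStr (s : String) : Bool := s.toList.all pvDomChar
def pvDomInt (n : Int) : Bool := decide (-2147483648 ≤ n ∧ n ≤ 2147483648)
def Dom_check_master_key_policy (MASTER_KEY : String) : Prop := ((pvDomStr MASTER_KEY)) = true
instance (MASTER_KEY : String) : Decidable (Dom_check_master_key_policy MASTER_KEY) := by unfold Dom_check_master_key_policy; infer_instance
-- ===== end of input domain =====

-- B replaces A's early-return chain of three separate any() scans with one pass maintaining three flags (alternative decomposition, same cost).

-- string.punctuation
def pvPunctuation : List Char := "!\"#$%&'()*+,-./:;<=>?@[\\]^_`{|}~".toList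

-- ===== PORT A =====
def check_master_key_policy (MASTER_KEY : String) : Bool :=
  if PySem.Str.len MASTER_KEY < 14 then false
  else if !(MASTER_KEY.toList.any (fun capital => PySem.Chars.isupper capital)) then false
  else if !(MASTER_KEY.toList.any (fun digit => PySem.Chars.isdigit digit)) then false
  else if !(MASTER_KEY.toList.any (fun special_c => PySem.Chars.isIn [special_c] pvPunctuation)) then false
  else true

-- ===== PORT B =====
def check_master_key_policy_alt (MASTER_KEY : String) : Bool :=
  let flags := MASTER_KEY.toList.foldl
    (fun (st : Bool × Bool × Bool) c =>
      (st.1 || PySem.Chars.isupper c,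
       st.2.1 || PySem.Chars.isdigit c,
       st.2.2 || PySem.Chars.isIn [c] pvPunctuation))
    (false, false, false)
  decide (PySem.Str.len MASTER_KEY ≥ 14) && flags.1 && flags.2.1 && flags.2.2

-- ===== PRECONDITION & SPEC =====
def Spec_check_master_key_policy (MASTER_KEY : String) (out : Bool) : Prop := out = check_master_key_policy_alt MASTER_KEY
instance (MASTER_KEY : String) (out : Bool) : Decidable (Spec_check_master_key_policy MASTER_KEY out) := by unfold Spec_check_master_key_policy; infer_instance

-- ===== CLAIM (what is proved, stated in full; the proofs are below) =====
def Claim_equal_check_master_key_policy : Prop := ∀ (MASTER_KEY : String), Dom_check_master_key_policy MASTER_KEY → Spec_check_master_key_policy MASTER_KEY (check_master_key_policy MASTER_KEY)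

-- ===== LEMMAS AND PROOFS =====
theorem pv_foldl_flags (cs : List Char) (u d p : Bool) :
    cs.foldl
      (fun (st : Bool × Bool × Bool) c =>
        (st.1 || PySem.Chars.isupper c,
         st.2.1 || PySem.Chars.isdigit c,
         st.2.2 || PySem.Chars.isIn [c] pvPunctuation))
      (u, d, p)
    = (u || cs.any (fun c => PySem.Chars.isupper c),
       d || cs.any (fun c => PySem.Chars.isdigit c),
       p || cs.any (fun c => PySem.Chars.isIn [c] pvPunctuation)) := by
  induction cs generalizing u d p with
  | nil => simp
  | cons c cs ih =>
    simp only [List.foldl_cons, List.any_cons, ih]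
    simp [Bool.or_assoc]

-- ===== VERDICT (by name: the statement is the Claim_ definition above) =====
theorem check_master_key_policy_spec : Claim_equal_check_master_key_policy := by
  intro s _
  unfold Spec_check_master_key_policy check_master_key_policy check_master_key_policy_alt
  simp only [pv_foldl_flags, Bool.false_or, PySem.Str.len_eq, ge_iff_le, ← String.length_toList]
  by_cases h : (14 : Int) ≤ s.toList.length
  · rw [if_neg (by omega), decide_eq_true h]
    cases hu : s.toList.any (fun c => PySem.Chars.isupper c) <;>
    cases hd : s.toList.any (fun c => PySem.Chars.isdigit c) <;>
    cases hp : s.toList.any (fun c => PySem.Chars.isIn [c] pvPunctuation) <;> simp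
  · rw [if_pos (by omega), decide_eq_false h]
    simp
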